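-- pv_equiv track=rewrite | github.com/jimpago/Dataset-Queries | src/relevance.py | naive_relevance_query_evaluation
-- ===== SOURCE A (Python) =====
-- def naive_relevance_query_evaluation(queries, transactions, rarity, k=None):
--     results = []
--     num_transactions = len(transactions)
--     for query in queries:
--         rels = []
--         for tid, transaction in enumerate(transactions):
--             rel = 0
--             for obj in query:
--                 occ = transaction.count(obj)
--                 rel += occ * rarity.get(obj, 0)
--             if rel > 0:
--                 rels.append([rel, tid])
--         rels.sort(reverse=True)
--         if k is not None:
--             rels = rels[:k]
--         results.append(rels)
--     return results
-- ===== SOURCE B (Python) =====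
-- def naive_relevance_query_evaluation(queries, transactions, rarity, k=None):
--     # Inverted index: one posting (the transaction id) per object OCCURRENCE,
--     # so a query only touches transactions that actually contain its objects.
--     index = {}
--     for tid, transaction in enumerate(transactions):
--         for obj in transaction:
--             index.setdefault(obj, []).append(tid)
--     n = len(transactions)
--     results = []
--     for query in queries:
--         scores = [0] * n
--         for obj in query:
--             w = rarity.get(obj, 0)
--             for tid in index.get(obj, []):
--                 scores[tid] += w
--         rels = [[rel, tid] for tid, rel in enumerate(scores) if rel > 0]
--         rels.sort(reverse=True)
--         results.append(rels if k is None else rels[:k])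
--     return results
-- ===== Notes on version B (the rewrite author's own statement) =====
-- stated objective: faster
-- what changed: B builds an inverted index mapping each object to the tids of its occurrences once, then answers each query by scattering rarity weights through the matching postings into a score array (touching only transactions that contain a query object) instead of scanning every transaction and counting every query object inside it.
import Mathlib
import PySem

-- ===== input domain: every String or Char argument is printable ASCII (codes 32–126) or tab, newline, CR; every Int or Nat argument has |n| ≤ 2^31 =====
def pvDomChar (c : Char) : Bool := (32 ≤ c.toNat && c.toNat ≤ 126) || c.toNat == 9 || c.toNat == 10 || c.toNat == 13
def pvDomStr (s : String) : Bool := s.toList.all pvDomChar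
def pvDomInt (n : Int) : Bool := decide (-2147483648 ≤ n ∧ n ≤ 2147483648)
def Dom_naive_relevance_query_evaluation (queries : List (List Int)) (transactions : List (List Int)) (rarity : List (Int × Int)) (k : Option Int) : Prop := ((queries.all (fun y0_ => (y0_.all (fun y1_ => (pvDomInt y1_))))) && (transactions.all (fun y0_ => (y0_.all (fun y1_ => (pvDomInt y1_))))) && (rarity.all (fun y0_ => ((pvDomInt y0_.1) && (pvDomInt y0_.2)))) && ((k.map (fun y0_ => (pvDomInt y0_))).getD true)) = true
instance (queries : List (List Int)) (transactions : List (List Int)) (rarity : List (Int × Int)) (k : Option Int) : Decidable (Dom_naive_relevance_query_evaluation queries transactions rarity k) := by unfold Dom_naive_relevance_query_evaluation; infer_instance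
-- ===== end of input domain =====

-- B replaces A's scan of every transaction per query by an inverted index
-- (object → tids of its occurrences) scattered into a score array (objective: faster).

-- ===== PORT A =====
def naive_relevance_query_evaluation (queries : List (List Int)) (transactions : List (List Int)) (rarity : List (Int × Int)) (k : Option Int) : List (List (List Int)) :=
  queries.foldl (fun results query =>
    let rels := (PySem.List.enumerate transactions).foldl (fun rels p =>
        let rel := query.foldl (fun rel obj =>
            let occ : Int := p.2.count obj
            rel + occ * (PySem.Dict.ofList rarity).getD obj 0) 0
        if rel > 0 then rels ++ [[rel, p.1]] else rels) []
    let rels := PySem.List.sorted2 rels (fun l => l.getD 0 0) (fun l => l.getD 1 0) true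
    let rels := match k with
      | some kv => PySem.List.slice rels none (some kv)
      | none => rels
    results ++ [rels]) []

-- ===== PORT B =====
def naive_relevance_query_evaluation_alt (queries : List (List Int)) (transactions : List (List Int)) (rarity : List (Int × Int)) (k : Option Int) : List (List (List Int)) :=
  let index := (PySem.List.enumerate transactions).foldl (fun d p =>
      p.2.foldl (fun d obj => d.modify obj [] (· ++ [p.1])) d) PySem.Dict.empty
  let n := transactions.length
  queries.foldl (fun results query =>
    let scores := query.foldl (fun s obj =>
        let w := (PySem.Dict.ofList rarity).getD obj 0
        (index.getD obj []).foldl (fun s tid =>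
          PySem.List.pySetD s tid (PySem.List.pyGetD s tid 0 + w)) s)
      (List.replicate n (0 : Int))
    let rels := (PySem.List.enumerate scores).filterMap (fun p =>
        if p.2 > 0 then some [p.2, p.1] else none)
    let rels := PySem.List.sorted2 rels (fun l => l.getD 0 0) (fun l => l.getD 1 0) true
    results ++ [match k with
      | some kv => PySem.List.slice rels none (some kv)
      | none => rels]) []

-- ===== PRECONDITION & SPEC =====
def Spec_naive_relevance_query_evaluation (queries : List (List Int)) (transactions : List (List Int)) (rarity : List (Int × Int)) (k : Option Int) (out : List (List (List Int))) : Prop := out = naive_relevance_query_evaluation_alt queries transactions rarity k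
instance (queries : List (List Int)) (transactions : List (List Int)) (rarity : List (Int × Int)) (k : Option Int) (out : List (List (List Int))) : Decidable (Spec_naive_relevance_query_evaluation queries transactions rarity k out) := by unfold Spec_naive_relevance_query_evaluation; infer_instance

-- ===== CLAIM (what is proved, stated in full; the proofs are below) =====
def Claim_equal_naive_relevance_query_evaluation : Prop := ∀ (queries : List (List Int)) (transactions : List (List Int)) (rarity : List (Int × Int)) (k : Option Int), Dom_naive_relevance_query_evaluation queries transactions rarity k → Spec_naive_relevance_query_evaluation queries transactions rarity k (naive_relevance_query_evaluation queries transactions rarity k)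

-- ===== LEMMAS AND PROOFS =====

-- the nested index-building fold is a flat fold over all (object, tid) occurrence pairs
lemma pv_build_flat (ts : List (Int × List Int)) (d : PySem.Dict Int (List Int)) :
    ts.foldl (fun d p => p.2.foldl (fun d obj => d.modify obj [] (· ++ [p.1])) d) d
      = (ts.flatMap (fun p => p.2.map (fun obj => (obj, p.1)))).foldl
          (fun d q => d.modify q.1 [] (· ++ [q.2])) d := by
  induction ts generalizing d with
  | nil => rfl
  | cons p t ih => simp [List.foldl_append, List.foldl_map, ih]

-- postings of one object: the tids of its occurrences, one per occurrence
lemma pv_postings (transactions : List (List Int)) (obj : Int) :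
    (((PySem.List.enumerate transactions).foldl (fun d p =>
        p.2.foldl (fun d o => d.modify o [] (· ++ [p.1])) d) PySem.Dict.empty).getD obj [])
      = (PySem.List.enumerate transactions).flatMap
          (fun p => List.replicate (p.2.count obj) p.1) := by
  rw [pv_build_flat, PySem.Dict.getD_foldl_modify_append]
  simp only [PySem.Dict.getD_empty, List.nil_append, List.filter_flatMap, List.map_flatMap]
  apply List.flatMap_congr  -- per transaction: filtered occurrence pairs → replicate
  intro p _
  induction p.2 with
  | nil => simp
  | cons x t ih =>
    by_cases h : x = obj <;>
      simp [h, ih, List.replicate_succ]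

-- applying c identical updates at position pre.length
lemma pv_apply_replicate (c : Nat) (w v : Int) (pre rest : List Int) :
    (List.replicate c ((pre.length : Int))).foldl (fun s tid =>
        PySem.List.pySetD s tid (PySem.List.pyGetD s tid 0 + w)) (pre ++ v :: rest)
      = pre ++ (v + c * w) :: rest := by
  induction c generalizing v with
  | zero => simp
  | succ m ih =>
    rw [List.replicate_succ, List.foldl_cons]
    have hg : PySem.List.pyGetD (pre ++ v :: rest) ((pre.length : Int)) 0 = v := by
      simp [PySem.List.pyGetD_natCast]
    have hs : PySem.List.pySetD (pre ++ v :: rest) ((pre.length : Int)) (v + w)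
        = pre ++ (v + w) :: rest := by
      simp [PySem.List.pySetD_natCast]
    rw [hg, hs, ih]
    congr 1
    push_cast
    ring_nf

-- scattering one object's postings adds count(t,obj)*w to every transaction's score
lemma pv_apply_postings (ts : List (List Int)) (obj w : Int) (pre : List Int) (g : List Int → Int) :
    ((PySem.List.enumerate ts ((pre.length : Int))).flatMap
        (fun p => List.replicate (p.2.count obj) p.1)).foldl
      (fun s tid => PySem.List.pySetD s tid (PySem.List.pyGetD s tid 0 + w))
      (pre ++ ts.map g)
    = pre ++ ts.map (fun t => g t + (t.count obj : Int) * w) := by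
  induction ts generalizing pre g with
  | nil => simp
  | cons t rest ih =>
    rw [PySem.List.enumerate_cons]
    simp only [List.flatMap_cons, List.foldl_append, List.map_cons]
    rw [show pre ++ (g t :: rest.map g) = pre ++ g t :: rest.map g from rfl]
    rw [pv_apply_replicate]
    have h1 : ((pre.length : Int)) + 1 = (((pre ++ [g t + (t.count obj : Int) * w]).length : Int)) := by
      simp
    have h2 : pre ++ (g t + (t.count obj : Int) * w) :: rest.map g
        = (pre ++ [g t + (t.count obj : Int) * w]) ++ rest.map g := by simp
    rw [h1, h2, ih (pre ++ [g t + (t.count obj : Int) * w]) g]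
    simp

-- the whole per-query scatter loop produces exactly A's per-transaction relevance scores
lemma pv_scores (query : List Int) (transactions : List (List Int)) (rarity : List (Int × Int))
    (g : List Int → Int) :
    query.foldl (fun s obj =>
        (((PySem.List.enumerate transactions).foldl (fun d p =>
            p.2.foldl (fun d o => d.modify o [] (· ++ [p.1])) d) PySem.Dict.empty).getD obj []).foldl
          (fun s tid => PySem.List.pySetD s tid
            (PySem.List.pyGetD s tid 0 + (PySem.Dict.ofList rarity).getD obj 0)) s)
      (transactions.map g)
    = transactions.map (fun t => query.foldl (fun rel obj =>
        rel + (t.count obj : Int) * (PySem.Dict.ofList rarity).getD obj 0) (g t)) := by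
  induction query generalizing g with
  | nil => simp
  | cons obj q ih =>
    rw [List.foldl_cons, pv_postings]
    have := pv_apply_postings transactions obj ((PySem.Dict.ofList rarity).getD obj 0) [] g
    norm_num at this
    rw [this, ih]
    simp

-- A's append-if accumulator loop is a comprehension (filterMap) over the same pairs
lemma pv_foldl_append_ite (l : List (Int × List Int)) (f : List Int → Int) :
    l.foldl (fun rels p => if f p.2 > 0 then rels ++ [[f p.2, p.1]] else rels) []
      = l.filterMap (fun p => if f p.2 > 0 then some [f p.2, p.1] else none) := by
  have h : ∀ acc, l.foldl (fun rels p => if f p.2 > 0 then rels ++ [[f p.2, p.1]] else rels) acc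
      = acc ++ l.filterMap (fun p => if f p.2 > 0 then some [f p.2, p.1] else none) := by
    induction l with
    | nil => simp
    | cons x t ih =>
      intro acc
      by_cases hx : f x.2 > 0 <;> simp [hx, ih]
  simpa using h []

-- enumerate over a mapped list
lemma pv_enumerate_map {α β : Type} (g : α → β) (xs : List α) (s : Int) :
    PySem.List.enumerate (xs.map g) s = (PySem.List.enumerate xs s).map (fun p => (p.1, g p.2)) := by
  induction xs generalizing s with
  | nil => simp [PySem.List.enumerate_nil]
  | cons x t ih => simp [PySem.List.enumerate_cons, ih]

-- ===== VERDICT (by name: the statement is the Claim_ definition above) =====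
theorem naive_relevance_query_evaluation_spec : Claim_equal_naive_relevance_query_evaluation := by
  intro queries transactions rarity k _
  unfold Spec_naive_relevance_query_evaluation naive_relevance_query_evaluation naive_relevance_query_evaluation_alt
  rw [PySem.List.foldl_append_singleton_eq_map, PySem.List.foldl_append_singleton_eq_map]
  apply List.map_congr_left
  intro query _
  have hrep : List.replicate transactions.length (0 : Int) = transactions.map (fun _ => (0 : Int)) := by
    simp
  rw [hrep, pv_scores query transactions rarity (fun _ => 0)]
  rw [pv_enumerate_map, List.filterMap_map]
  simp only [Function.comp_def]
  rw [pv_foldl_append_ite (PySem.List.enumerate transactions)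
        (fun t => query.foldl (fun rel obj =>
          rel + ((t.count obj : Int)) * (PySem.Dict.ofList rarity).getD obj 0) 0)]
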